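-- pv_equiv track=rewrite | github.com/Dongyeon1201/CodingTest_Study_Python | programmers/n^배열자르기.py | solution
-- ===== SOURCE A (Python) =====
-- def solution(n, left, right):
--
--     count = 0
--     idx = 1
--     array = []
--
--     while count < right:
--         if left // n:
--
--             # right 값을 left와의 거리로 변경
--             right -= left
--
--             # left가 몇행에 존재하는지 구하기
--             line = left // n
--
--             # left가 행의 몇번째 요소인지 확인
--             left %= n
--
--             # left의 값을 더해주어 기존에 left와의 차이 값을 사용하여 인덱스로 변경해준다.
--             right += left
--
--             # 현재 몇행인지 인덱스 갱신
--             idx += line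
--
--         else:
--             array += ([idx] * idx) + list(range(idx + 1, n + 1))
--             count += n
--             idx += 1
--
--     return array[left : right + 1]
-- ===== SOURCE B (Python) =====
-- def solution(n, left, right):
--     # cell k of the flattened n x n matrix is max(row, col) + 1, computed directly per index
--     return [max(k // n, k % n) + 1 for k in range(left, right + 1)]
-- ===== Notes on version B (the rewrite author's own statement) =====
-- stated objective: simpler
-- what changed: B computes each requested element directly by the closed formula max(k//n, k%n)+1 over k in [left, right] (a one-line comprehension), instead of A's while-loop that materialises whole matrix rows from row left//n up to right into a list and then slices it.
-- intended difference: On natural-domain inputs (1 <= n, 0 <= left <= right) with right % n == 0, A's while-loop (while count < right) stops one row too early and never materialises index right, so A returns the answer with its last element missing (e.g. solution(2,0,0) = []); B returns the intended inclusive slice ([1]). — e.g. on solution(2, 0, 0): A returns [], B returns [1]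
-- outside the precondition, e.g. on solution(3, -1, 2): A returns [3, 1, 2, 3], B returns [3, 1, 2, 3]; on solution(3, -3, -1): A returns [], B returns [1, 2, 3]; on solution(-2, -3, -1): A returns [], B returns [2, 2, 1]
import Mathlib
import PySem

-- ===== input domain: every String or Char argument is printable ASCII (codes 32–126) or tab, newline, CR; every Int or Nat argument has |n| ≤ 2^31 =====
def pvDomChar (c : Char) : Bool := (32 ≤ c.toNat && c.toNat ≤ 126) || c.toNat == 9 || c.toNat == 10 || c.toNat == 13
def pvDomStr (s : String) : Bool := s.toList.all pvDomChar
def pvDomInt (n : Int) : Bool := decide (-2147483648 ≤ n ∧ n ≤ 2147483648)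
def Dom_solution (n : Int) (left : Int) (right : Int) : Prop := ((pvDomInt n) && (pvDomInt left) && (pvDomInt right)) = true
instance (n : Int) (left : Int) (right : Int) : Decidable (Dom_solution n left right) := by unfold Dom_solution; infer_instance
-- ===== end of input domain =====

-- B replaces A's row-materialising while-loop and slice by the per-index closed formula max(k//n, k%n)+1 (simpler);
-- on right % n == 0 A drops the last element (loop stops one row early) — stated as the intended difference D_.

-- ===== PORT A =====
-- the while-loop of A, fuel-guarded only to make it total (on Pre_ inputs the fuel never runs out);
-- returns the final (array, left, right) since A mutates left and right inside the loop
def solLoop (n : Int) (fuel : Nat) (left right count idx : Int) (array : List Int) :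
    List Int × Int × Int :=
  match fuel with
  | 0 => (array, left, right)
  | fuel + 1 =>
    if count < right then
      if PySem.Int.floordiv left n ≠ 0 then
        -- right -= left; line = left // n; left %= n; right += left; idx += line
        let line := PySem.Int.floordiv left n
        let left' := PySem.Int.mod left n
        let right' := (right - left) + left'
        solLoop n fuel left' right' count (idx + line) array
      else
        -- array += [idx]*idx + list(range(idx+1, n+1)); count += n; idx += 1
        solLoop n fuel left right (count + n) (idx + 1)
          (array ++ (List.replicate idx.toNat idx ++ PySem.List.pyRange (idx + 1) (n + 1) 1))
    else (array, left, right)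

def solution (n : Int) (left : Int) (right : Int) : List Int :=
  let res := solLoop n (right.toNat + 2) left right 0 1 []
  PySem.List.slice res.1 (some res.2.1) (some (res.2.2 + 1))

-- ===== PORT B =====
def solution_alt (n : Int) (left : Int) (right : Int) : List Int :=
  (PySem.List.pyRange left (right + 1) 1).map
    (fun k => max (PySem.Int.floordiv k n) (PySem.Int.mod k n) + 1)

-- ===== PRECONDITION & SPEC =====
-- Pre_ admits the problem's natural domain (1 ≤ n, 0 ≤ left ≤ right < n²) plus all empty queries
-- (left > right, where both programs return []); it excludes n = 0 with 0 < right ≤ left (A raises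
-- ZeroDivisionError), n ≤ 0 with left ≤ right (A raises, diverges, or returns [] while B computes
-- floor-division values), and non-empty queries with left < 0 or right ≥ n², where A's values are
-- accidents of leftover loop state / rows beyond the n×n matrix.
def Pre_solution (n : Int) (left : Int) (right : Int) : Prop :=
  (1 ≤ n ∧ 0 ≤ left ∧ left ≤ right ∧ right < n * n)
    ∨ (right < left ∧ (right ≤ 0 ∨ n ≠ 0))
instance (n : Int) (left : Int) (right : Int) : Decidable (Pre_solution n left right) := by
  unfold Pre_solution; infer_instance
def pvWitness_solution : Int × Int × Int := (3, 2, 7)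

-- On inputs with right % n == 0, A's while-loop (while count < right) stops one row too early and
-- returns the answer with its last element missing; B returns the intended inclusive slice [left..right].
def D_solution (n : Int) (left : Int) (right : Int) : Prop :=
  1 ≤ n ∧ 0 ≤ left ∧ left ≤ right ∧ PySem.Int.mod right n = 0
instance (n : Int) (left : Int) (right : Int) : Decidable (D_solution n left right) := by
  unfold D_solution; infer_instance

def Spec_solution (n : Int) (left : Int) (right : Int) (out : List Int) : Prop :=
  ¬ D_solution n left right → out = solution_alt n left right
instance (n : Int) (left : Int) (right : Int) (out : List Int) :
    Decidable (Spec_solution n left right out) := by unfold Spec_solution; infer_instance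

def pvDiffWitness_solution : Int × Int × Int := (2, 0, 0)
def pvDiffWitnessOut_solution : (List Int) × (List Int) := ([], [1])

-- ===== CLAIM (what is proved, stated in full; the proofs are below) =====
def Claim_unchanged_solution : Prop := ∀ (n : Int) (left : Int) (right : Int), Dom_solution n left right → Pre_solution n left right → Spec_solution n left right (solution n left right)
def Claim_changed_solution : Prop := Dom_solution (pvDiffWitness_solution.1) (pvDiffWitness_solution.2.1) (pvDiffWitness_solution.2.2) ∧ Pre_solution (pvDiffWitness_solution.1) (pvDiffWitness_solution.2.1) (pvDiffWitness_solution.2.2) ∧ D_solution (pvDiffWitness_solution.1) (pvDiffWitness_solution.2.1) (pvDiffWitness_solution.2.2) ∧ solution (pvDiffWitness_solution.1) (pvDiffWitness_solution.2.1) (pvDiffWitness_solution.2.2) = pvDiffWitnessOut_solution.1 ∧ solution_alt (pvDiffWitness_solution.1) (pvDiffWitness_solution.2.1) (pvDiffWitness_solution.2.2) = pvDiffWitnessOut_solution.2 ∧ pvDiffWitnessOut_solution.1 ≠ pvDiffWitnessOut_solution.2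
def Claim_exact_solution : Prop := ∀ (n : Int) (left : Int) (right : Int), Dom_solution n left right → Pre_solution n left right → D_solution n left right → solution n left right ≠ solution_alt n left right

-- ===== LEMMAS AND PROOFS =====

-- B's per-index formula, the common value both closed forms are phrased with
def pvF (n k : Int) : Int := max (PySem.Int.floordiv k n) (PySem.Int.mod k n) + 1

-- the rows A appends, as a pure function of the starting idx and the number of rows
def pvBuild (n idx : Int) : Nat → List Int
  | 0 => []
  | m + 1 =>
      (List.replicate idx.toNat idx ++ PySem.List.pyRange (idx + 1) (n + 1) 1)
        ++ pvBuild n (idx + 1) m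

lemma solLoop_done (n : Int) (fuel : Nat) (left : Int) (right : Int) (count idx : Int) (array : List Int)
    (h : right ≤ count) : solLoop n fuel left right count idx array = (array, left, right) := by
  cases fuel with
  | zero => rfl
  | succ f => simp [solLoop, not_lt.mpr h]

lemma solLoop_succ (n : Int) (f : Nat) (left right count idx : Int) (array : List Int) :
    solLoop n (f + 1) left right count idx array
      = if count < right then
          (if PySem.Int.floordiv left n ≠ 0 then
            solLoop n f (PySem.Int.mod left n)
              ((right - left) + PySem.Int.mod left n) count
              (idx + PySem.Int.floordiv left n) array
          else
            solLoop n f left right (count + n) (idx + 1)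
              (array ++ (List.replicate idx.toNat idx ++ PySem.List.pyRange (idx + 1) (n + 1) 1)))
        else (array, left, right) := rfl

lemma solLoop_else (n left right : Int) (hn : 0 < n) (h0 : 0 ≤ left) (hln : left < n) :
    ∀ (m fuel : Nat), m ≤ fuel → ∀ (count idx : Int) (array : List Int),
      right ≤ count + m * n → count + m * n < right + n →
      solLoop n fuel left right count idx array = (array ++ pvBuild n idx m, left, right) := by
  have hguard : PySem.Int.floordiv left n = 0 :=
    (PySem.Int.floordiv_eq_iff_of_pos hn).mpr (by constructor <;> omega)
  intro m
  induction m with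
  | zero =>
      intro fuel _ count idx array h1 _
      simp only [Nat.cast_zero, zero_mul, add_zero] at h1
      simp [solLoop_done n fuel left right count idx array h1, pvBuild]
  | succ m ih =>
      intro fuel hf count idx array h1 h2
      have hmn : (0:Int) ≤ (m : Int) * n := by positivity
      have hcr : count < right := by push_cast at h2; nlinarith
      obtain ⟨f, rfl⟩ : ∃ f, fuel = f + 1 := ⟨fuel - 1, by omega⟩
      simp only [solLoop, if_pos hcr, hguard, ne_eq, not_true_eq_false, if_false]
      rw [ih f (by omega) (count + n) (idx + 1)
        (array ++ (List.replicate idx.toNat idx ++ PySem.List.pyRange (idx + 1) (n + 1) 1))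
        (by push_cast at h1 ⊢; linarith) (by push_cast at h2 ⊢; linarith)]
      simp [pvBuild, List.append_assoc]

-- one row, as B's formula over its columns
lemma pvRow_eq (n i : Int) (hn : 0 < n) (h0 : 0 ≤ i) (hin : i + 1 ≤ n) :
    List.replicate (i + 1).toNat (i + 1) ++ PySem.List.pyRange (i + 2) (n + 1) 1
      = (List.range n.toNat).map (fun (c : Nat) => pvF n (n * i + (c : Int))) := by
  have hF : ∀ c : Nat, (c : Int) < n → pvF n (n * i + (c : Int)) = max i (c : Int) + 1 := by
    intro c hc
    have hne : n ≠ 0 := by omega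
    unfold pvF
    rw [PySem.Int.floordiv_eq_ediv_of_pos hn, PySem.Int.mod_eq_emod_of_pos hn]
    have hd : (n * i + (c : Int)) / n = i := by
      rw [mul_comm n i, add_comm, Int.add_mul_ediv_right _ _ hne,
        Int.ediv_eq_zero_of_lt (by positivity) hc]
      omega
    have hm : (n * i + (c : Int)) % n = (c : Int) := by
      rw [mul_comm n i, add_comm, Int.add_mul_emod_self_right,
        Int.emod_eq_of_lt (by positivity) hc]
    rw [hd, hm]
  have hsplit : n.toNat = (i.toNat + 1) + (n.toNat - i.toNat - 1) := by omega
  rw [hsplit, List.range_add, List.map_append]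
  congr 1
  · symm
    apply List.eq_replicate_iff.mpr
    constructor
    · simp; omega
    · intro b hb
      simp only [List.mem_map, List.mem_range] at hb
      obtain ⟨c, hc, rfl⟩ := hb
      have hmax : max i (c : Int) = i := max_eq_left (by omega)
      rw [hF c (by omega), hmax]
  · rw [PySem.List.pyRange_one]
    have hlen : ((n + 1) - (i + 2)).toNat = n.toNat - i.toNat - 1 := by omega
    rw [hlen, List.map_map]
    apply List.map_congr_left
    intro c hc
    simp only [List.mem_range] at hc
    simp only [Function.comp_apply]
    rw [hF (i.toNat + 1 + c) (by push_cast; omega)]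
    have hmax : max i ((((i.toNat + 1 + c : Nat)) : Int)) = ((i.toNat + 1 + c : Nat) : Int) :=
      max_eq_right (by push_cast; omega)
    rw [hmax]
    push_cast
    omega

lemma pvBuild_eq (n : Int) (hn : 0 < n) :
    ∀ (m : Nat) (i : Int), 0 ≤ i → i + m ≤ n →
      pvBuild n (i + 1) m
        = (List.range (m * n.toNat)).map (fun (p : Nat) => pvF n (n * i + (p : Int))) := by
  intro m
  induction m with
  | zero => intro i _ _; simp [pvBuild]
  | succ m ih =>
      intro i h0 hin
      have hrec : pvBuild n (i + 1) (m + 1)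
          = (List.replicate (i + 1).toNat (i + 1) ++ PySem.List.pyRange (i + 1 + 1) (n + 1) 1)
              ++ pvBuild n (i + 1 + 1) m := rfl
      rw [hrec, ih (i + 1) (by omega) (by push_cast at hin ⊢; omega),
        show (i : Int) + 1 + 1 = i + 2 by ring,
        pvRow_eq n i hn h0 (by push_cast at hin; omega)]
      have hsp : (m + 1) * n.toNat = n.toNat + m * n.toNat := by ring
      rw [hsp, List.range_add, List.map_append, List.map_map]
      congr 1
      apply List.map_congr_left
      intro p _
      simp only [Function.comp_apply]
      congr 1
      push_cast [Int.toNat_of_nonneg hn.le]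
      ring

lemma pvExists_rows (n R : Int) (hnpos : 0 < n) (hne : n ≠ 0) (hR0 : 0 ≤ R) :
    ∃ m : Nat, R ≤ (m : Int) * n ∧ (m : Int) * n < R + n := by
  rcases eq_or_lt_of_le hR0 with h | h
  · exact ⟨0, by push_cast; omega, by push_cast; omega⟩
  · obtain ⟨t, ht⟩ : ∃ t, t = (R - 1) / n := ⟨_, rfl⟩
    have hdm : n * t + (R - 1) % n = R - 1 := by rw [ht]; exact Int.mul_ediv_add_emod (R - 1) n
    have he0 : 0 ≤ (R - 1) % n := Int.emod_nonneg (R - 1) hne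
    have he1 : (R - 1) % n < n := Int.emod_lt_of_pos (R - 1) hnpos
    have ht0 : 0 ≤ t := ht ▸ Int.ediv_nonneg (by omega) (by omega)
    have hcast : (((t + 1).toNat : Nat) : Int) = t + 1 := by omega
    refine ⟨(t + 1).toNat, ?_, ?_⟩
    · rw [hcast]; nlinarith
    · rw [hcast]; nlinarith

lemma pvSlice_nil (a b : Int) : PySem.List.slice ([] : List Int) (some a) (some b) = [] := by
  simp [PySem.List.slice, PySem.List.clampIdx]

lemma pvSlice_empty (xs : List Int) (a b : Int) (hb : 0 ≤ b) (hab : b ≤ a) :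
    PySem.List.slice xs (some a) (some b) = [] := by
  rw [PySem.List.slice_toNat xs (by omega) hb]
  have h : b.toNat - a.toNat = 0 := by omega
  rw [h]
  simp

-- A returns [] on every empty query admitted by Pre_
lemma solution_empty (n left right : Int) (hlr : right < left) (h2 : right ≤ 0 ∨ n ≠ 0) :
    solution n left right = [] := by
  unfold solution
  rcases le_or_gt right 0 with hr0 | hrpos
  · rw [solLoop_done n _ left right 0 1 [] hr0]
    exact pvSlice_nil _ _
  · have hne : n ≠ 0 := by rcases h2 with h | h; omega; exact h
    have hlpos : 0 < left := by omega
    have hfe : right.toNat + 2 = right.toNat + 1 + 1 := rfl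
    rcases lt_trichotomy n 0 with hneg | hzero | hpos
    · -- n < 0: the adjustment branch fires once, then right' < 0 and the loop exits
      have hmodb := PySem.Int.mod_neg_bounds left hneg
      have hq : PySem.Int.floordiv left n ≠ 0 := by
        intro h0'
        have hid := PySem.Int.floordiv_mul_add_mod left n
        rw [h0'] at hid
        simp at hid
        omega
      rw [hfe, solLoop_succ, if_pos hrpos, if_pos hq,
        solLoop_done n _ _ _ 0 _ [] (by omega)]
      exact pvSlice_nil _ _
    · omega
    · -- 0 < n: the loop may build rows, but the final slice [left' : right'+1] has right' < left'
      rcases lt_or_ge left n with hsm | hbig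
      · -- no adjustment: rows are built until count ≥ right, slice [left : right+1] is empty
        obtain ⟨m, hm1, hm2⟩ := pvExists_rows n right hpos hne (by omega)
        rw [solLoop_else n left right hpos (by omega) hsm m (right.toNat + 2)
          (by nlinarith) 0 1 [] (by omega) (by omega)]
        dsimp only
        exact pvSlice_empty _ _ _ (by omega) (by omega)
      · -- one adjustment step; afterwards right' < left' ∈ [0, n)
        have hq1 : 1 ≤ PySem.Int.floordiv left n :=
          (PySem.Int.le_floordiv_iff_mul_le hpos).mpr (by omega)
        have hr0 : 0 ≤ PySem.Int.mod left n := PySem.Int.mod_nonneg left hpos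
        have hrn : PySem.Int.mod left n < n := PySem.Int.mod_lt left hpos
        rw [hfe, solLoop_succ, if_pos hrpos, if_pos (by omega)]
        rcases le_or_gt ((right - left) + PySem.Int.mod left n) 0 with hR0 | hRpos
        · rw [solLoop_done n _ _ _ 0 _ [] hR0]
          exact pvSlice_nil _ _
        · obtain ⟨m, hm1, hm2⟩ :=
            pvExists_rows n ((right - left) + PySem.Int.mod left n) hpos hne (by omega)
          rw [solLoop_else n (PySem.Int.mod left n) _ hpos hr0 hrn m (right.toNat + 1)
            (by nlinarith) 0 _ [] (by omega) (by omega)]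
          dsimp only
          exact pvSlice_empty _ _ _ (by omega) (by omega)

lemma map_range_drop (g : Nat → Int) (N a : Nat) :
    ((List.range N).map g).drop a = (List.range (N - a)).map (fun j => g (a + j)) := by
  apply List.ext_getElem
  · simp
  · intro i h1 h2
    simp

-- A's result, in closed form: B's formula over range [left..right], last element dropped when n ∣ right
lemma solution_closed (n left right : Int) (hn : 1 ≤ n) (h0 : 0 ≤ left)
    (hlr : left ≤ right) (hrn : right < n * n) :
    solution n left right
      = (List.range (if PySem.Int.mod right n = 0 then (right - left).toNat
          else (right - left + 1).toNat)).map (fun (j : Nat) => pvF n (left + (j : Int))) := by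
  have hnpos : (0:Int) < n := hn
  have hne : n ≠ 0 := by omega
  -- q, r, the adjusted left/right (opaque names with defining equations)
  obtain ⟨q, hq⟩ : ∃ q, q = PySem.Int.floordiv left n := ⟨_, rfl⟩
  obtain ⟨r, hr⟩ : ∃ r, r = PySem.Int.mod left n := ⟨_, rfl⟩
  have hqr : n * q + r = left := by
    rw [hq, hr, mul_comm]; exact PySem.Int.floordiv_mul_add_mod left n
  have hr0 : 0 ≤ r := hr ▸ PySem.Int.mod_nonneg left hnpos
  have hrn' : r < n := hr ▸ PySem.Int.mod_lt left hnpos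
  have hq0 : 0 ≤ q := hq ▸ (PySem.Int.le_floordiv_iff_mul_le hnpos).mpr (by linarith)
  obtain ⟨R, hR⟩ : ∃ R, R = right - n * q := ⟨_, rfl⟩
  have hRr : r ≤ R := by omega
  have hR0 : 0 ≤ R := by omega
  have hRub : R < (n - q) * n := by nlinarith
  -- the exact number of rows the loop builds
  obtain ⟨m, hm1, hm2⟩ := pvExists_rows n R hnpos hne hR0
  have hmn : q + (m : Int) ≤ n := by
    by_contra h
    rw [not_le] at h
    have h1 : n - q ≤ (m : Int) - 1 := by omega
    have h2 : (n - q) * n ≤ ((m : Int) - 1) * n :=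
      mul_le_mul_of_nonneg_right h1 (by omega)
    nlinarith
  -- fuel bound
  have hfuel : (m : Int) ≤ right + 1 := by nlinarith
  -- run the loop to its closed form
  have hloop : solLoop n (right.toNat + 2) left right 0 1 []
      = (pvBuild n (q + 1) m, r, R) := by
    rcases lt_or_ge left n with hsm | hbig
    · -- left < n: the adjustment branch never fires; q = 0, r = left, R = right
      have hq0' : q = 0 := by
        rw [hq]; exact (PySem.Int.floordiv_eq_iff_of_pos hnpos).mpr (by constructor <;> omega)
      have hnq : n * q = 0 := by rw [hq0', mul_zero]
      have hrl : r = left := by omega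
      have hRe : R = right := by omega
      rw [solLoop_else n left right hnpos h0 hsm m (right.toNat + 2) (by omega) 0 1 []
        (by omega) (by omega)]
      rw [hq0', hrl, hRe]
      simp
    · -- n ≤ left: one adjustment step, then the else-only loop
      have hq1 : 1 ≤ q := by
        rw [hq]; exact (PySem.Int.le_floordiv_iff_mul_le hnpos).mpr (by omega)
      have hqpos : PySem.Int.floordiv left n ≠ 0 := by rw [← hq]; omega
      have hrp : (0:Int) < right := by omega
      have hstep : solLoop n (right.toNat + 1 + 1) left right 0 1 []
          = solLoop n (right.toNat + 1) r ((right - left) + r) 0 (1 + q) [] := by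
        rw [solLoop_succ, if_pos hrp, if_pos hqpos, ← hq, ← hr]
      have hfe : right.toNat + 2 = right.toNat + 1 + 1 := rfl
      rw [hfe, hstep]
      have hRe : (right - left) + r = R := by omega
      rw [hRe]
      rw [solLoop_else n r R hnpos hr0 hrn' m (right.toNat + 1) (by omega) 0 (1 + q) []
        (by omega) (by omega)]
      rw [add_comm 1 q]
      simp
  -- assemble: slice [r : R+1] of the built array
  unfold solution
  rw [hloop]
  simp only
  rw [pvBuild_eq n hnpos m q hq0 hmn]
  rw [PySem.List.slice_toNat _ hr0 (by omega)]
  rw [map_range_drop, ← List.map_take, List.take_range]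
  have hdvd : (PySem.Int.mod right n = 0) ↔ n ∣ R := by
    rw [PySem.Int.mod_eq_zero_iff_dvd, hR]
    exact ⟨fun h => h.sub (dvd_mul_right n q),
      fun h => by have h2 := h.add (dvd_mul_right n q); simpa using h2⟩
  have hcast : ((m * n.toNat : Nat) : Int) = (m : Int) * n := by
    push_cast [Int.toNat_of_nonneg (by omega : (0:Int) ≤ n)]; ring
  have hmin : min ((R + 1).toNat - r.toNat) (m * n.toNat - r.toNat)
      = (if PySem.Int.mod right n = 0 then (right - left).toNat
          else (right - left + 1).toNat) := by
    by_cases hD : PySem.Int.mod right n = 0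
    · -- n ∣ R, hence R = m*n exactly: the slice is clipped at the array end
      have hdR : n ∣ R := hdvd.mp hD
      have hd2 : n ∣ ((m : Int) * n - R) := dvd_sub (dvd_mul_left n m) hdR
      have hb1 : 0 ≤ (m : Int) * n - R := by omega
      have hb2 : (m : Int) * n - R < n := by omega
      have h3 : ((m : Int) * n - R) % n = (m : Int) * n - R := Int.emod_eq_of_lt hb1 hb2
      have h4 : ((m : Int) * n - R) % n = 0 := Int.emod_eq_zero_of_dvd hd2
      have hRe : R = (m : Int) * n := by omega
      rw [if_pos hD]
      omega
    · -- n ∤ R: R < m*n, the slice ends at index R inclusive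
      have hdR : ¬ n ∣ R := fun h => hD (hdvd.mpr h)
      have hner : R ≠ (m : Int) * n := fun h => hdR (h ▸ dvd_mul_left n m)
      rw [if_neg (show ¬ PySem.Int.mod right n = 0 from hD)]
      omega
  rw [hmin]
  apply List.map_congr_left
  intro j _
  congr 1
  push_cast [Int.toNat_of_nonneg hr0]
  omega

lemma solution_alt_closed (n left right : Int) :
    solution_alt n left right
      = (List.range (right + 1 - left).toNat).map (fun (j : Nat) => pvF n (left + (j : Int))) := by
  unfold solution_alt
  rw [PySem.List.pyRange_one, List.map_map]
  rfl

-- ===== VERDICT (by name: the statement is the Claim_ definition above) =====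
theorem solution_spec : Claim_unchanged_solution := by
  intro n left right _ hpre hD
  rcases hpre with ⟨hn, h0, hlr, hrn⟩ | ⟨hlr, h2⟩
  · have hD' : ¬ PySem.Int.mod right n = 0 := fun h => hD ⟨hn, h0, hlr, h⟩
    rw [solution_closed n left right hn h0 hlr hrn, solution_alt_closed]
    rw [if_neg hD', show (right - left + 1).toNat = (right + 1 - left).toNat by omega]
  · rw [solution_empty n left right hlr h2, solution_alt_closed,
      show (right + 1 - left).toNat = 0 by omega]
    simp

theorem solution_changed : Claim_changed_solution := by
  unfold Claim_changed_solution; decide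

theorem solution_tight : Claim_exact_solution := by
  intro n left right _ hpre hD
  obtain ⟨hn, h0, hlr, hDm⟩ := hD
  rcases hpre with ⟨_, _, _, hrn⟩ | ⟨hlr', _⟩
  · rw [solution_closed n left right hn h0 hlr hrn, solution_alt_closed, if_pos hDm]
    intro h
    have := congrArg List.length h
    simp at this
    omega
  · omega
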